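-- pv_equiv track=rewrite | github.com/alvinliu0/vfms | gradio_client/wan2.1_t2v_1.3B_singleGPU_client.py | _map_parameters
-- ===== SOURCE A (Python) =====
-- from typing import Any, Dict, Optional
--
-- def _map_parameters(parameters: Dict[str, Any]) -> Dict[str, Any]:
--     """Map old parameter names to new ones for backward compatibility."""
--     mapped_params = parameters.copy()
--
--     # Map old parameter names to new ones
--     if "num_frames" in mapped_params and "frame_num" not in mapped_params:
--         mapped_params["frame_num"] = mapped_params.pop("num_frames")
--
--     if "num_inference_steps" in mapped_params and "sample_steps" not in mapped_params:
--         mapped_params["sample_steps"] = mapped_params.pop("num_inference_steps")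
--
--     if "guidance_scale" in mapped_params and "sample_guide_scale" not in mapped_params:
--         mapped_params["sample_guide_scale"] = mapped_params.pop("guidance_scale")
--
--     if "seed" in mapped_params and "base_seed" not in mapped_params:
--         mapped_params["base_seed"] = mapped_params.pop("seed")
--
--     # Remove unsupported parameters
--     unsupported_params = ["fps", "batch_size", "video_save_name"]
--     for param in unsupported_params:
--         if param in mapped_params:
--             del mapped_params[param]
--
--     return mapped_params
-- ===== SOURCE B (Python) =====
-- from typing import Any, Dict
--
--
-- def _map_parameters(parameters: Dict[str, Any]) -> Dict[str, Any]:
--     """Map old parameter names to new ones for backward compatibility.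
--
--     Non-mutating rebuild: classify the keys of the input once, then construct
--     the result in one go as {kept entries} followed by {renamed entries};
--     correct because all old/new/unsupported key names are pairwise distinct,
--     so A's sequential pops and deletes commute into a single partition."""
--     renames = {
--         "num_frames": "frame_num",
--         "num_inference_steps": "sample_steps",
--         "guidance_scale": "sample_guide_scale",
--         "seed": "base_seed",
--     }
--     moved = {old: new for old, new in renames.items()
--              if old in parameters and new not in parameters}
--     gone = set(moved) | {"fps", "batch_size", "video_save_name"}
--     head = {k: v for k, v in parameters.items() if k not in gone}
--     tail = {new: parameters[old] for old, new in moved.items()}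
--     return {**head, **tail}
-- ===== Notes on version B (the rewrite author's own statement) =====
-- stated objective: alternative
-- what changed: Replaces A's sequence of in-place dict mutations (four guarded pop-and-reinsert blocks plus a deletion loop) with a non-mutating rebuild: classify which renames fire on the original dict, then construct the result in one pass as a comprehension over the kept entries followed by a comprehension of the renamed entries.
import Mathlib
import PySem

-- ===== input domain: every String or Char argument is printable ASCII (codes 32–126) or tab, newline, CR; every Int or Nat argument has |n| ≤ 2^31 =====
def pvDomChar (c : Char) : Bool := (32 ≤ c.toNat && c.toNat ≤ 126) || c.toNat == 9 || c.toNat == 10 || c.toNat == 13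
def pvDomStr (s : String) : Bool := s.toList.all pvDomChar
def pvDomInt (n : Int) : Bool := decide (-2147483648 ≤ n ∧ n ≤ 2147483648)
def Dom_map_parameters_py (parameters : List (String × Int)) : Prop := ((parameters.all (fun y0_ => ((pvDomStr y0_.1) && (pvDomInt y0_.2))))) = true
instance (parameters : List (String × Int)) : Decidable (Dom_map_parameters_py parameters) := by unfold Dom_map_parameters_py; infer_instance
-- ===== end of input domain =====

-- ===== PORT A =====
-- B replaces A's in-place mutation sequence by a non-mutating partition-and-rebuild (objective: alternative).
def map_parameters_py (parameters : List (String × Int)) : List (String × Int) :=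
  let d := PySem.Dict.ofList parameters
  let d := if d.contains "num_frames" && !(d.contains "frame_num") then
             match d.pop? "num_frames" with
             | some (v, d') => d'.insert "frame_num" v
             | none => d
           else d
  let d := if d.contains "num_inference_steps" && !(d.contains "sample_steps") then
             match d.pop? "num_inference_steps" with
             | some (v, d') => d'.insert "sample_steps" v
             | none => d
           else d
  let d := if d.contains "guidance_scale" && !(d.contains "sample_guide_scale") then
             match d.pop? "guidance_scale" with
             | some (v, d') => d'.insert "sample_guide_scale" v
             | none => d
           else d
  let d := if d.contains "seed" && !(d.contains "base_seed") then
             match d.pop? "seed" with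
             | some (v, d') => d'.insert "base_seed" v
             | none => d
           else d
  let d := (["fps", "batch_size", "video_save_name"].foldl
    (fun d param => if d.contains param then d.erase param else d) d)
  d.items

-- ===== PORT B =====
def pvRenames : List (String × String) :=
  [("num_frames", "frame_num"), ("num_inference_steps", "sample_steps"),
   ("guidance_scale", "sample_guide_scale"), ("seed", "base_seed")]

def map_parameters_py_alt (parameters : List (String × Int)) : List (String × Int) :=
  let d := PySem.Dict.ofList parameters
  -- moved = {old: new for old, new in renames.items() if old in parameters and new not in parameters}
  let moved := pvRenames.filter (fun r => d.contains r.1 && !(d.contains r.2))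
  -- gone = set(moved) | {"fps", "batch_size", "video_save_name"}
  let gone := PySem.Set.union (PySem.Set.ofList (moved.map (·.1)))
                (PySem.Set.ofList ["fps", "batch_size", "video_save_name"])
  -- head = {k: v for k, v in parameters.items() if k not in gone}
  let head := d.items.filter (fun p => !(gone.contains p.1))
  -- tail = {new: parameters[old] for old, new in moved.items()}  (old present by moved's guard)
  let tail := moved.map (fun r => (r.2, d.getD r.1 0))
  head ++ tail

-- ===== PRECONDITION & SPEC =====
def Spec_map_parameters_py (parameters : List (String × Int)) (out : List (String × Int)) : Prop := out = map_parameters_py_alt parameters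
instance (parameters : List (String × Int)) (out : List (String × Int)) : Decidable (Spec_map_parameters_py parameters out) := by unfold Spec_map_parameters_py; infer_instance

-- ===== CLAIM (what is proved, stated in full; the proofs are below) =====
def Claim_equal_map_parameters_py : Prop := ∀ (parameters : List (String × Int)), Dom_map_parameters_py parameters → Spec_map_parameters_py parameters (map_parameters_py parameters)

-- ===== LEMMAS AND PROOFS =====

-- guard of one rename block, read on an items list
def pvGd (l : List (String × Int)) (o n : String) : Bool :=
  (l.any fun p => p.1 == o) && !(l.any fun p => p.1 == n)

-- value looked up for a key (used only under the guard, where the key is present)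
def pvVal (l : List (String × Int)) (k : String) : Int :=
  ((l.find? fun p => p.1 == k).map (·.2)).getD 0

-- one rename block, as a pure function on the items list
def pvStep (l : List (String × Int)) (o n : String) : List (String × Int) :=
  if pvGd l o n then (l.filter fun p => !(p.1 == o)) ++ [(n, pvVal l o)] else l

def pvFiltOut (ks : List String) (l : List (String × Int)) : List (String × Int) :=
  l.filter fun p => !(ks.contains p.1)

theorem pvAny_pres (l : List (String × Int)) (ks : List String) (t : List (String × Int))
    (k : String) (hk : ks.contains k = false) (ht : ∀ p ∈ t, p.1 ≠ k) :
    ((pvFiltOut ks l ++ t).any fun p => p.1 == k) = (l.any fun p => p.1 == k) := by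
  have hk' : k ∉ ks := by simpa using hk
  have htf : (t.any fun p => p.1 == k) = false := by
    simp only [List.any_eq_false]
    intro p hp
    simp [ht p hp]
  simp only [pvFiltOut, List.any_append, htf, Bool.or_false, List.any_filter]
  congr 1
  funext a
  by_cases h : a.1 = k
  · subst h; simp [hk']
  · simp [h]

theorem pvFindFilter (l : List (String × Int)) (ks : List String) (k : String)
    (hk' : k ∉ ks) :
    List.find? (fun p => p.1 == k) (List.filter (fun p => !decide (p.1 ∈ ks)) l)
      = List.find? (fun p => p.1 == k) l := by
  induction l with
  | nil => simp
  | cons a l ih =>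
    by_cases h2 : a.1 ∈ ks
    · have h : a.1 ≠ k := by rintro rfl; exact hk' h2
      simp [List.filter_cons, h2, List.find?_cons, h, ih]
    · by_cases h : a.1 = k
      · subst h; simp [List.filter_cons, h2, List.find?_cons]
      · simp [List.filter_cons, h2, List.find?_cons, h, ih]

theorem pvFind_pres (l : List (String × Int)) (ks : List String) (t : List (String × Int))
    (k : String) (hk : ks.contains k = false) (ht : ∀ p ∈ t, p.1 ≠ k) :
    ((pvFiltOut ks l ++ t).find? fun p => p.1 == k) = (l.find? fun p => p.1 == k) := by
  have hk' : k ∉ ks := by simpa using hk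
  have htf : (t.find? fun p => p.1 == k) = none := by
    simp only [List.find?_eq_none]
    intro p hp
    simp [ht p hp]
  have := pvFindFilter l ks k hk'
  simp only [pvFiltOut, List.find?_append, htf, Option.or_none]
  simpa using this

theorem pvFiltOut_snoc (ks : List String) (o : String) (l : List (String × Int)) :
    ((pvFiltOut ks l).filter fun p => !(p.1 == o)) = pvFiltOut (ks ++ [o]) l := by
  simp only [pvFiltOut, List.filter_filter]
  apply List.filter_congr
  intro p _
  by_cases h : p.1 = o <;> by_cases h2 : ks.contains p.1 <;> simp [h, h2]

theorem pvStepA_eq (m : List (String × Int)) (o n : String) :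
    (if (PySem.Dict.mk m).contains o && !((PySem.Dict.mk m).contains n) then
       match (PySem.Dict.mk m).pop? o with
       | some (v, d') => d'.insert n v
       | none => PySem.Dict.mk m
     else PySem.Dict.mk m) = PySem.Dict.mk (pvStep m o n) := by
  by_cases h : pvGd m o n
  · have ho : (m.any fun p => p.1 == o) = true := by
      have := h; unfold pvGd at this; exact (Bool.and_eq_true _ _ |>.mp this).1
    have hn : (m.any fun p => p.1 == n) = false := by
      have := h; unfold pvGd at this
      simpa using (Bool.and_eq_true _ _ |>.mp this).2
    have hguard : ((PySem.Dict.mk m).contains o && !((PySem.Dict.mk m).contains n)) = true := by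
      simp [PySem.Dict.contains, PySem.Dict.items, ho, hn]
    rw [if_pos hguard]
    -- find? is some
    obtain ⟨x, hx, hxo⟩ := List.any_eq_true.mp ho
    have hs : (m.find? (fun p => p.1 == o)).isSome := List.find?_isSome.mpr ⟨x, hx, hxo⟩
    obtain ⟨pr, hpr⟩ := Option.isSome_iff_exists.mp hs
    have hpop : (PySem.Dict.mk m).pop? o = some (pr.2, (PySem.Dict.mk m).erase o) := by
      simp [PySem.Dict.pop?, PySem.Dict.get?, PySem.Dict.items, hpr]
    rw [hpop]
    -- after erase, n still absent, so insert appends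
    have hcn : ((PySem.Dict.mk m).erase o).contains n = false := by
      simp only [PySem.Dict.erase, PySem.Dict.contains, PySem.Dict.items, List.any_filter]
      rw [List.any_eq_false] at hn ⊢
      intro p hp
      have := hn p hp
      simp_all
    show ((PySem.Dict.mk m).erase o).insert n pr.2 = _
    rw [PySem.Dict.insert]
    rw [hcn]
    simp only [Bool.false_eq_true, if_false]
    unfold pvStep
    rw [if_pos h]
    unfold pvVal
    rw [hpr]
    rfl
  · rw [if_neg (show ¬((PySem.Dict.mk m).contains o && !((PySem.Dict.mk m).contains n)) = true from h)]
    unfold pvStep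
    rw [if_neg h]

theorem pvDropA_eq (m : List (String × Int)) (u : String) :
    (if (PySem.Dict.mk m).contains u then (PySem.Dict.mk m).erase u else PySem.Dict.mk m)
      = PySem.Dict.mk (m.filter fun p => !(p.1 == u)) := by
  by_cases h : (PySem.Dict.mk m).contains u
  · rw [if_pos h]; rfl
  · rw [if_neg h]
    have hany : (m.any fun p => p.1 == u) = false := by
      rw [List.any_eq_false]
      intro p hp
      have h2 : ¬ (m.any fun p => p.1 == u) = true := h
      rw [List.any_eq_true] at h2
      push_neg at h2
      exact h2 p hp
    have : m.filter (fun p => !(p.1 == u)) = m := by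
      apply List.filter_eq_self.mpr
      intro p hp
      have := List.any_eq_false.mp hany p hp
      simpa using this
    rw [this]

theorem pvSteps_nf (rs : List (String × String)) (l : List (String × Int))
    (ks : List String) (t : List (String × Int))
    (hnd : (rs.map (·.1) ++ rs.map (·.2)).Nodup)
    (hks : ∀ r ∈ rs, ks.contains r.1 = false ∧ ks.contains r.2 = false)
    (ht : ∀ r ∈ rs, ∀ p ∈ t, p.1 ≠ r.1 ∧ p.1 ≠ r.2) :
    rs.foldl (fun m r => pvStep m r.1 r.2) (pvFiltOut ks l ++ t)
      = pvFiltOut (ks ++ ((rs.filter fun r => pvGd l r.1 r.2).map (·.1))) l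
        ++ (t ++ (rs.filter fun r => pvGd l r.1 r.2).map (fun r => (r.2, pvVal l r.1))) := by
  induction rs generalizing ks t with
  | nil => simp
  | cons r rs ih =>
    -- decompose the nodup hypothesis
    rw [List.map_cons, List.map_cons, List.cons_append] at hnd
    rw [List.nodup_cons] at hnd
    obtain ⟨hr1, hnd1⟩ := hnd
    rw [List.nodup_append] at hnd1
    obtain ⟨hA, hB0, hdisj0⟩ := hnd1
    rw [List.nodup_cons] at hB0
    obtain ⟨hr2B, hB⟩ := hB0
    have hr1A : r.1 ∉ rs.map (·.1) := fun h => hr1 (List.mem_append.mpr (Or.inl h))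
    have hr1r2 : r.1 ≠ r.2 := fun h => hr1 (List.mem_append.mpr (Or.inr (h ▸ List.mem_cons_self)))
    have hr1B : r.1 ∉ rs.map (·.2) := fun h => hr1 (List.mem_append.mpr (Or.inr (List.mem_cons_of_mem _ h)))
    have hr2A : ∀ a ∈ rs.map (·.1), a ≠ r.2 := fun a ha =>
      hdisj0 a ha r.2 List.mem_cons_self
    have hAB : ∀ a ∈ rs.map (·.1), a ∉ rs.map (·.2) := fun a ha hb =>
      hdisj0 a ha a (List.mem_cons_of_mem _ hb) rfl
    have hnd' : (rs.map (·.1) ++ rs.map (·.2)).Nodup := by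
      rw [List.nodup_append]
      exact ⟨hA, hB, fun a ha b hb => hdisj0 a ha b (List.mem_cons_of_mem _ hb)⟩
    -- head-guard facts
    have hk1 : ks.contains r.1 = false := (hks r List.mem_cons_self).1
    have hk2 : ks.contains r.2 = false := (hks r List.mem_cons_self).2
    have ht1 : ∀ p ∈ t, p.1 ≠ r.1 := fun p hp => (ht r List.mem_cons_self p hp).1
    have ht2 : ∀ p ∈ t, p.1 ≠ r.2 := fun p hp => (ht r List.mem_cons_self p hp).2
    have hgd : pvGd (pvFiltOut ks l ++ t) r.1 r.2 = pvGd l r.1 r.2 := by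
      unfold pvGd
      rw [pvAny_pres l ks t r.1 hk1 ht1, pvAny_pres l ks t r.2 hk2 ht2]
    rw [List.foldl_cons]
    by_cases hg : pvGd l r.1 r.2 = true
    · have hstep : pvStep (pvFiltOut ks l ++ t) r.1 r.2
          = pvFiltOut (ks ++ [r.1]) l ++ (t ++ [(r.2, pvVal l r.1)]) := by
        unfold pvStep
        rw [hgd, if_pos hg]
        have hvv : pvVal (pvFiltOut ks l ++ t) r.1 = pvVal l r.1 := by
          unfold pvVal
          rw [pvFind_pres l ks t r.1 hk1 ht1]
        rw [hvv, List.filter_append, pvFiltOut_snoc]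
        have : t.filter (fun p => !(p.1 == r.1)) = t := by
          apply List.filter_eq_self.mpr
          intro p hp
          simp [ht1 p hp]
        rw [this, List.append_assoc]
      rw [hstep]
      rw [ih (ks ++ [r.1]) (t ++ [(r.2, pvVal l r.1)]) hnd'
          (by
            intro r' hr'
            have hne1 : r'.1 ≠ r.1 := fun e => hr1A (e ▸ List.mem_map_of_mem hr')
            have hne2 : r'.2 ≠ r.1 := fun e => hr1B (e ▸ List.mem_map_of_mem hr')
            have m1 : r'.1 ∉ ks := by simpa using (hks r' (List.mem_cons_of_mem _ hr')).1
            have m2 : r'.2 ∉ ks := by simpa using (hks r' (List.mem_cons_of_mem _ hr')).2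
            constructor
            · simp [List.contains_append, m1, hne1]
            · simp [List.contains_append, m2, hne2])
          (by
            intro r' hr' p hp
            rcases List.mem_append.mp hp with hp | hp
            · exact ht r' (List.mem_cons_of_mem _ hr') p hp
            · have hpe : p = (r.2, pvVal l r.1) := by simpa using hp
              subst hpe
              constructor
              · intro e
                exact (hr2A r'.1 (List.mem_map_of_mem hr') (show r.2 = r'.1 from e).symm).elim
              · intro e
                have e' : r.2 = r'.2 := e
                exact hr2B (e' ▸ List.mem_map_of_mem hr'))]
      simp [List.filter_cons, hg, List.append_assoc]
    · have hstep : pvStep (pvFiltOut ks l ++ t) r.1 r.2 = pvFiltOut ks l ++ t := by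
        unfold pvStep
        rw [hgd, if_neg hg]
      rw [hstep]
      rw [ih ks t hnd'
          (fun r' hr' => hks r' (List.mem_cons_of_mem _ hr'))
          (fun r' hr' p hp => ht r' (List.mem_cons_of_mem _ hr') p hp)]
      simp [List.filter_cons, hg]

-- ===== VERDICT (by name: the statement is the Claim_ definition above) =====
theorem map_parameters_py_spec : Claim_equal_map_parameters_py := by
  intro parameters _
  unfold Spec_map_parameters_py
  simp only [map_parameters_py, map_parameters_py_alt]
  generalize PySem.Dict.ofList parameters = d
  obtain ⟨l⟩ := d
  rw [pvStepA_eq, pvStepA_eq, pvStepA_eq, pvStepA_eq]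
  simp only [List.foldl_cons, List.foldl_nil]
  rw [pvDropA_eq, pvDropA_eq, pvDropA_eq]
  dsimp only []
  have hM : (List.filter (fun r => (PySem.Dict.mk l).contains r.1 && !((PySem.Dict.mk l).contains r.2)) pvRenames)
      = List.filter (fun r => pvGd l r.1 r.2) pvRenames := rfl
  rw [hM]
  have hT : (List.map (fun r => (r.2, (PySem.Dict.mk l).getD r.1 0)) (List.filter (fun r => pvGd l r.1 r.2) pvRenames))
      = (List.filter (fun r => pvGd l r.1 r.2) pvRenames).map (fun r => (r.2, pvVal l r.1)) := rfl
  rw [hT]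
  set M := List.filter (fun r => pvGd l r.1 r.2) pvRenames with hMdef
  have hMsub : M.Sublist pvRenames := List.filter_sublist
  have hMfstnodup : (M.map (·.1)).Nodup := (List.Sublist.map (·.1) hMsub).nodup (by decide)
  have hofl : PySem.Set.ofList (M.map (·.1)) = M.map (·.1) :=
    PySem.Set.ofList_eq_self_of_nodup _ hMfstnodup
  have hol2 : (PySem.Set.ofList ["fps", "batch_size", "video_save_name"] : List String)
      = ["fps", "batch_size", "video_save_name"] := by decide
  have hdisj : ∀ x ∈ (["fps", "batch_size", "video_save_name"] : List String), x ∉ M.map (·.1) := by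
    intro x hx hmem
    have hfst : x ∈ pvRenames.map (·.1) := (List.Sublist.map (·.1) hMsub).subset hmem
    have hnot : ∀ y ∈ pvRenames.map (·.1), y ∉ (["fps", "batch_size", "video_save_name"] : List String) := by decide
    exact hnot x hfst hx
  have hunion : (PySem.Set.ofList (M.map (·.1))).union
        (PySem.Set.ofList ["fps", "batch_size", "video_save_name"])
      = M.map (·.1) ++ ["fps", "batch_size", "video_save_name"] := by
    show PySem.Set.update _ _ = _
    rw [hofl, hol2]
    exact PySem.Set.update_eq_append_of_disjoint _ _ (by decide) hdisj
  rw [hunion]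
  have hstart : pvStep (pvStep (pvStep (pvStep l "num_frames" "frame_num") "num_inference_steps" "sample_steps") "guidance_scale" "sample_guide_scale") "seed" "base_seed"
      = pvRenames.foldl (fun m r => pvStep m r.1 r.2) (pvFiltOut [] l ++ []) := by
    have h0 : pvFiltOut [] l ++ [] = l := by simp [pvFiltOut]
    rw [h0]
    simp [pvRenames]
  rw [hstart,
    pvSteps_nf pvRenames l [] [] (by decide)
      (by intro r hr; exact ⟨rfl, rfl⟩)
      (by intro r hr p hp; cases hp)]
  simp only [List.nil_append]
  rw [← hMdef]
  have hdrop : ∀ (u : String) (ks : List String) (t : List (String × Int)), (∀ p ∈ t, p.1 ≠ u) →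
      ((pvFiltOut ks l ++ t).filter fun p => !(p.1 == u)) = pvFiltOut (ks ++ [u]) l ++ t := by
    intro u ks t htu
    rw [List.filter_append, pvFiltOut_snoc]
    congr 1
    apply List.filter_eq_self.mpr
    intro p hp
    simp [htu p hp]
  have htailne : ∀ u ∈ (["fps", "batch_size", "video_save_name"] : List String),
      ∀ p ∈ M.map (fun r => (r.2, pvVal l r.1)), p.1 ≠ u := by
    intro u hu p hp
    obtain ⟨r, hrM, rfl⟩ := List.mem_map.mp hp
    have hrP : r ∈ pvRenames := (List.mem_filter.mp hrM).1
    have hnot : ∀ r ∈ pvRenames, ∀ u ∈ (["fps", "batch_size", "video_save_name"] : List String), r.2 ≠ u := by decide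
    exact hnot r hrP u hu
  rw [hdrop "fps" _ _ (htailne _ (by decide)),
      hdrop "batch_size" _ _ (htailne _ (by decide)),
      hdrop "video_save_name" _ _ (htailne _ (by decide))]
  have hks : ((M.map (·.1) ++ ["fps"]) ++ ["batch_size"]) ++ ["video_save_name"]
      = M.map (·.1) ++ ["fps", "batch_size", "video_save_name"] := by simp
  rw [hks]
  rfl
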